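-- pv_equiv track=rewrite | github.com/kevinyang372/algorithm-studies | google/number_of_subarrays_that_satisfy_condition.py | numSubarray
-- ===== SOURCE A (Python) =====
-- def numSubarray(arr):
--
--     res = len(set(arr))
--
--     for m in range(len(arr) - 1):
--         max_val = min_val = arr[m]
--         for n in range(m + 1, len(arr)):
--             max_val = max(max_val, arr[n])
--             min_val = min(min_val, arr[n])
--
--             if max_val - min_val == n - m:
--                 res += 1
--
--     return res
-- ===== SOURCE B (Python) =====
-- def numSubarray(arr):
--     # single left-to-right DP pass: for each right endpoint extend the
--     # (max, min) state of every start, count windows with max-min == length-1,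
--     # and count first occurrences for the distinct-value term
--     res = 0
--     seen = set()
--     states = []  # states[j] = (max, min) of arr[j:n] before step n
--     for n, x in enumerate(arr):
--         if x not in seen:
--             seen.add(x)
--             res += 1
--         states = [(max(M, x), min(m, x)) for (M, m) in states]
--         res += sum(1 for j, (M, m) in enumerate(states) if M - m == n - j)
--         states.append((x, x))
--     return res
-- ===== Notes on version B (the rewrite author's own statement) =====
-- stated objective: alternative
-- what changed: Replaces the start-index outer loop with running max/min per start (and an upfront set(arr)) by a single left-to-right DP over right endpoints that maintains a list of (max,min) states for every start and fuses the distinct-value count into the same pass.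
import Mathlib
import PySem

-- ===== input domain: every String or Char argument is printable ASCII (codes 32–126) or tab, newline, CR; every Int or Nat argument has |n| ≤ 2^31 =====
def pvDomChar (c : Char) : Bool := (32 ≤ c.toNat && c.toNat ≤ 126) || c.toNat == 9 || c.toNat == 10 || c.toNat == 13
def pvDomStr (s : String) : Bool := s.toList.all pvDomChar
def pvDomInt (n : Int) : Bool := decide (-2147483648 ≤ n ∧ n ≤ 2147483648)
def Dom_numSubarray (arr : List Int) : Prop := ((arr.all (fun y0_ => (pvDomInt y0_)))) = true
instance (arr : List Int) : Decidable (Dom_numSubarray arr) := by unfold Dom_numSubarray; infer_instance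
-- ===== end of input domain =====

-- B replaces A's per-start outer loop (plus an upfront set(arr)) by one left-to-right DP over
-- right endpoints carrying a (max,min) state per start, fusing the distinct count into the pass
-- (objective: alternative; same O(n^2) cost).

-- ===== PORT A =====
-- inner-loop body of A: running max/min over arr[n], count when max-min == n-m
def bodyA (arr : List Int) (m : Int) (st : Int × Int × Int) (n : Int) : Int × Int × Int :=
  let mx := max st.1 (PySem.List.pyGetD arr n 0)
  let mn := min st.2.1 (PySem.List.pyGetD arr n 0)
  (mx, mn, if mx - mn = n - m then st.2.2 + 1 else st.2.2)

def numSubarray (arr : List Int) : Int :=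
  (PySem.List.pyRange 0 ((arr.length : Int) - 1) 1).foldl
    (fun res m =>
      ((PySem.List.pyRange (m + 1) (arr.length : Int) 1).foldl (bodyA arr m)
        (PySem.List.pyGetD arr m 0, PySem.List.pyGetD arr m 0, res)).2.2)
    (PySem.Set.len (PySem.Set.ofList arr))

-- ===== PORT B =====
-- loop body of B: state (res, seen, states); nx = (n, x) from enumerate(arr)
def bodyB (s : Int × PySem.Set Int × List (Int × Int)) (nx : Int × Int) :
    Int × PySem.Set Int × List (Int × Int) :=
  let rs := if PySem.Set.contains s.2.1 nx.2 then (s.1, s.2.1)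
            else (s.1 + 1, PySem.Set.add s.2.1 nx.2)
  let states := s.2.2.map (fun p => (max p.1 nx.2, min p.2 nx.2))
  (rs.1 + ((PySem.List.enumerate states 0).map
      (fun jp => if jp.2.1 - jp.2.2 = nx.1 - jp.1 then (1 : Int) else 0)).sum,
   rs.2, states ++ [(nx.2, nx.2)])

def numSubarray_alt (arr : List Int) : Int :=
  ((PySem.List.enumerate arr 0).foldl bodyB (0, PySem.Set.empty, [])).1

-- ===== PRECONDITION & SPEC =====
def Spec_numSubarray (arr : List Int) (out : Int) : Prop := out = numSubarray_alt arr
instance (arr : List Int) (out : Int) : Decidable (Spec_numSubarray arr out) := by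
  unfold Spec_numSubarray; infer_instance

-- ===== CLAIM (what is proved, stated in full; the proofs are below) =====
def Claim_equal_numSubarray : Prop := ∀ (arr : List Int), Dom_numSubarray arr → Spec_numSubarray arr (numSubarray arr)

-- ===== LEMMAS AND PROOFS =====

-- count, scanning l with running max/min seeded (mx, mn) and window-length counter k
def scanC : Int → Int → Int → List Int → Int
  | _, _, _, [] => 0
  | mx, mn, k, y :: ys =>
      (if max mx y - min mn y = k then 1 else 0) + scanC (max mx y) (min mn y) (k + 1) ys

-- sum of scanC over all suffixes: the pair-count both programs compute
def tailsSum : List Int → Int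
  | [] => 0
  | x :: ys => scanC x x 1 ys + tailsSum ys

-- Σ over states of the indicator, counter starting at k and decreasing
def indSum : Int → List (Int × Int) → Int
  | _, [] => 0
  | k, q :: rest => (if q.1 - q.2 = k then 1 else 0) + indSum (k - 1) rest

-- Σ over states of scanC over l, counter starting at k and decreasing
def goSum : Int → List (Int × Int) → List Int → Int
  | _, [], _ => 0
  | k, p :: rest, l => scanC p.1 p.2 k l + goSum (k - 1) rest l

-- number of elements of l not yet in seen (first occurrences)
def distinctNew : PySem.Set Int → List Int → Int
  | _, [] => 0
  | seen, x :: xs =>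
      (if PySem.Set.contains seen x then 0 else 1) + distinctNew (PySem.Set.add seen x) xs

-- reference form of B's loop
def Bcount : PySem.Set Int → List (Int × Int) → List Int → Int
  | _, _, [] => 0
  | seen, states, x :: xs =>
      (if PySem.Set.contains seen x then 0 else 1)
      + indSum (states.length : Int) (states.map fun p => (max p.1 x, min p.2 x))
      + Bcount (PySem.Set.add seen x) ((states.map fun p => (max p.1 x, min p.2 x)) ++ [(x, x)]) xs

theorem goSum_nil_right (states : List (Int × Int)) : ∀ k : Int, goSum k states [] = 0 := by
  induction states with
  | nil => intro k; rfl
  | cons p rest ih => intro k; simp [goSum, scanC, ih]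

theorem goSum_append (a b : List (Int × Int)) :
    ∀ (k : Int) (l : List Int),
      goSum k (a ++ b) l = goSum k a l + goSum (k - (a.length : Int)) b l := by
  induction a with
  | nil => intro k l; simp [goSum]
  | cons p rest ih =>
      intro k l
      simp only [List.cons_append, goSum, ih, List.length_cons]
      push_cast
      have h2 : k - ((rest.length : Int) + 1) = k - 1 - (rest.length : Int) := by ring
      rw [h2]
      ring

theorem goSum_cons_elem (states : List (Int × Int)) :
    ∀ (k x : Int) (xs : List Int),
      goSum k states (x :: xs)
        = indSum k (states.map fun p => (max p.1 x, min p.2 x))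
          + goSum (k + 1) (states.map fun p => (max p.1 x, min p.2 x)) xs := by
  induction states with
  | nil => intro k x xs; simp [goSum, indSum]
  | cons p rest ih =>
      intro k x xs
      simp only [goSum, List.map_cons, indSum, scanC, ih]
      have : k - 1 + 1 = k := by ring
      rw [this]
      ring

theorem Bcount_eq (l : List Int) :
    ∀ (seen : PySem.Set Int) (states : List (Int × Int)),
      Bcount seen states l
        = distinctNew seen l + goSum (states.length : Int) states l + tailsSum l := by
  induction l with
  | nil => intro seen states; simp [Bcount, distinctNew, tailsSum, goSum_nil_right]
  | cons x xs ih =>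
      intro seen states
      simp only [Bcount, distinctNew, tailsSum, ih]
      rw [goSum_cons_elem]
      rw [show ((((states.map fun p => (max p.1 x, min p.2 x)) ++ [(x, x)]).length : Int))
            = (states.length : Int) + 1 by simp]
      rw [goSum_append]
      simp only [List.length_map, goSum, add_sub_cancel_left]
      ring_nf

theorem distinctNew_eq (l : List Int) :
    ∀ seen : PySem.Set Int,
      distinctNew seen l = ((PySem.Set.update seen l).length : Int) - (seen.length : Int) := by
  induction l with
  | nil => intro seen; simp [distinctNew, PySem.Set.update]
  | cons x xs ih =>
      intro seen
      simp only [distinctNew, PySem.Set.update_cons, ih]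
      by_cases h : x ∈ seen
      · rw [PySem.Set.add_of_mem h]
        simp [h]
      · rw [PySem.Set.add_of_not_mem h]
        simp [h, List.length_append]
        ring

theorem enumSum (st : List (Int × Int)) :
    ∀ (s n : Int),
      ((PySem.List.enumerate st s).map
          (fun jp => if jp.2.1 - jp.2.2 = n - jp.1 then (1 : Int) else 0)).sum
        = indSum (n - s) st := by
  induction st with
  | nil => intro s n; simp [PySem.List.enumerate_nil, indSum]
  | cons q rest ih =>
      intro s n
      rw [PySem.List.enumerate_cons]
      simp only [List.map_cons, List.sum_cons, ih, indSum]
      have : n - (s + 1) = n - s - 1 := by ring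
      rw [this]

theorem altB_loop (l : List Int) :
    ∀ (k res : Int) (seen : PySem.Set Int) (states : List (Int × Int)),
      (states.length : Int) = k →
      ((PySem.List.enumerate l k).foldl bodyB (res, seen, states)).1
        = res + Bcount seen states l := by
  induction l with
  | nil => intro k res seen states _; simp [PySem.List.enumerate_nil, Bcount]
  | cons x xs ih =>
      intro k res seen states hk
      rw [PySem.List.enumerate_cons, List.foldl_cons]
      simp only [bodyB]
      by_cases h : x ∈ seen
      · have hc : PySem.Set.contains seen x = true := (PySem.Set.contains_iff seen x).2 h
        simp only [hc, if_true]
        rw [ih (k + 1) _ seen _ (by simp [← hk])]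
        rw [enumSum]
        simp only [Bcount, hc, if_true, PySem.Set.add_of_mem h, sub_zero, ← hk]
        ring
      · have hc : PySem.Set.contains seen x = false := by
          by_contra hh
          exact h ((PySem.Set.contains_iff seen x).1 (by simpa using hh))
        simp only [hc, Bool.false_eq_true, if_false]
        rw [ih (k + 1) _ _ _ (by simp [← hk])]
        rw [enumSum]
        simp only [Bcount, hc, Bool.false_eq_true, if_false, sub_zero, ← hk]
        ring

theorem alt_eq (arr : List Int) :
    numSubarray_alt arr = ((PySem.Set.ofList arr).length : Int) + tailsSum arr := by
  unfold numSubarray_alt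
  rw [altB_loop arr 0 0 PySem.Set.empty [] (by simp)]
  rw [Bcount_eq, distinctNew_eq]
  simp [goSum, PySem.Set.empty, PySem.Set.update_nil_left]

theorem innerA_loop (arr : List Int) (m : Int) :
    ∀ (t : List Int) (s : Nat), arr.drop s = t → ∀ (mx mn res : Int),
      ((PySem.List.pyRange (s : Int) (arr.length : Int) 1).foldl (bodyA arr m)
          (mx, mn, res)).2.2
        = res + scanC mx mn ((s : Int) - m) t := by
  intro t
  induction t with
  | nil =>
      intro s hs mx mn res
      have hlen : arr.length ≤ s := by
        have := List.drop_eq_nil_iff.1 hs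
        omega
      rw [PySem.List.pyRange_one_eq_nil (by exact_mod_cast hlen)]
      simp [scanC]
  | cons y t' ih =>
      intro s hs mx mn res
      have hslt : s < arr.length := by
        by_contra hh
        rw [List.drop_eq_nil_iff.2 (by omega)] at hs
        simp at hs
      have hdrop : arr.drop s = arr[s] :: arr.drop (s + 1) :=
        (List.getElem_cons_drop hslt).symm
      rw [hs] at hdrop
      have hpair := List.cons_eq_cons.1 hdrop
      have hy : y = arr[s] := hpair.1
      have ht' : arr.drop (s + 1) = t' := hpair.2.symm
      have hab : (s : Int) < (arr.length : Int) := by exact_mod_cast hslt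
      rw [PySem.List.pyRange_one_cons hab, List.foldl_cons]
      have hget : PySem.List.pyGetD arr (s : Int) 0 = arr[s] := by
        simp [PySem.List.pyGetD_natCast, List.getElem?_eq_getElem hslt]
      simp only [bodyA, hget]
      have hcast : (s : Int) + 1 = ((s + 1 : Nat) : Int) := by omega
      rw [hcast, ih (s + 1) ht' (max mx arr[s]) (min mn arr[s]) _]
      simp only [scanC, hy]
      have : ((s + 1 : Nat) : Int) - m = (s : Int) - m + 1 := by omega
      rw [this]
      split_ifs <;> ring

theorem outerA_loop (arr : List Int) :
    ∀ (t : List Int) (s : Nat), arr.drop s = t → ∀ (res : Int),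
      (PySem.List.pyRange (s : Int) ((arr.length : Int) - 1) 1).foldl
        (fun res m =>
          ((PySem.List.pyRange (m + 1) (arr.length : Int) 1).foldl (bodyA arr m)
            (PySem.List.pyGetD arr m 0, PySem.List.pyGetD arr m 0, res)).2.2)
        res = res + tailsSum t := by
  intro t
  induction t with
  | nil =>
      intro s hs res
      have hlen : arr.length ≤ s := by
        have := List.drop_eq_nil_iff.1 hs
        omega
      rw [PySem.List.pyRange_one_eq_nil (by omega)]
      simp [tailsSum]
  | cons y t' ih =>
      intro s hs res
      have hslt : s < arr.length := by
        by_contra hh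
        rw [List.drop_eq_nil_iff.2 (by omega)] at hs
        simp at hs
      have hdrop : arr.drop s = arr[s] :: arr.drop (s + 1) :=
        (List.getElem_cons_drop hslt).symm
      rw [hs] at hdrop
      have hpair := List.cons_eq_cons.1 hdrop
      have hy : y = arr[s] := hpair.1
      have ht' : arr.drop (s + 1) = t' := hpair.2.symm
      by_cases hlast : s + 1 = arr.length
      · -- last start index: outer range is empty and the suffix contributes 0
        rw [PySem.List.pyRange_one_eq_nil (by omega)]
        have ht'nil : t' = [] := by
          rw [← ht', List.drop_eq_nil_iff.2 (by omega)]
        simp [ht'nil, tailsSum, scanC]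
      · have hs2 : s + 1 < arr.length := by omega
        have hab : (s : Int) < (arr.length : Int) - 1 := by omega
        rw [PySem.List.pyRange_one_cons hab, List.foldl_cons]
        have hget : PySem.List.pyGetD arr (s : Int) 0 = arr[s] := by
          simp [PySem.List.pyGetD_natCast, List.getElem?_eq_getElem hslt]
        have hcast : (s : Int) + 1 = ((s + 1 : Nat) : Int) := by omega
        rw [hget, hcast, innerA_loop arr (s : Int) t' (s + 1) ht']
        have hone : ((s + 1 : Nat) : Int) - (s : Int) = 1 := by omega
        rw [hone]
        rw [ih (s + 1) ht']
        simp only [tailsSum, hy]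
        ring

theorem a_eq (arr : List Int) :
    numSubarray arr = PySem.Set.len (PySem.Set.ofList arr) + tailsSum arr := by
  unfold numSubarray
  have h0 : arr.drop 0 = arr := by simp
  have := outerA_loop arr arr 0 h0 (PySem.Set.len (PySem.Set.ofList arr))
  simpa using this

-- ===== VERDICT (by name: the statement is the Claim_ definition above) =====
theorem numSubarray_spec : Claim_equal_numSubarray := by
  intro arr _
  unfold Spec_numSubarray
  rw [a_eq, alt_eq]
  congr 1
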